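-- pv_equiv track=rewrite | github.com/naivecynics/abc-utils | cleaner.py | _score_tokenize
-- ===== SOURCE A (Python) =====
-- from typing import Dict, List, Tuple, Optional
--
-- def _score_tokenize(body: str) -> List[str]:
--     out = []
--     i = 0
--     while i < len(body):
--         c = body[i]
--         if c.isspace():
--             i += 1
--             continue
--         if c in '(){}|':
--             out.append(c)
--             i += 1
--             continue
--         if c.isdigit():
--             j = i
--             while j < len(body) and body[j].isdigit():
--                 j += 1
--             out.append(body[i:j])
--             i = j
--             continue
--         i += 1
--     return out
-- ===== SOURCE B (Python) =====
-- import re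
--
-- _SCORE_TOKEN_RE = re.compile(r'\d+|[(){}|]')
--
-- def _score_tokenize(body: str) -> list:
--     return _SCORE_TOKEN_RE.findall(body)
-- ===== Notes on version B (the rewrite author's own statement) =====
-- stated objective: idiomatic
-- what changed: The manual index/while-loop tokenizer is replaced by a single precompiled regex scan, re.findall(r'\d+|[(){}|]', body), which yields maximal digit runs and individual brackets/pipes while skipping everything else; no explicit index or inner loop remains.
import Mathlib
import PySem

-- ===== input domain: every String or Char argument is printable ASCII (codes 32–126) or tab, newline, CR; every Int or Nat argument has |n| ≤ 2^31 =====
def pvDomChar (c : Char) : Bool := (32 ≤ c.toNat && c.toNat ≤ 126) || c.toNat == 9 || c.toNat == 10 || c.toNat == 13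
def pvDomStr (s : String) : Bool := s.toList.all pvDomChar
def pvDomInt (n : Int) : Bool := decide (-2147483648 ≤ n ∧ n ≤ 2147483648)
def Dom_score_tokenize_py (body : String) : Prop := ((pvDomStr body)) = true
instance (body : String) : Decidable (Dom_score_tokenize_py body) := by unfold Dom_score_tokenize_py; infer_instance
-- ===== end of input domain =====

-- B replaces A's manual index/while tokenizer with a single regex scan (re.findall of r'\d+|[(){}|]'),
-- ported as structural recursion with takeWhile/dropWhile; objective: idiomatic.

-- ===== PORT A =====
-- inner 'while j < len(body) and body[j].isdigit(): j += 1'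
def aDigEnd (l : List Char) (j : Nat) : Nat :=
  if h : j < l.length then
    if PySem.Chars.isdigit l[j] then aDigEnd l (j + 1) else j
  else j
termination_by l.length - j

theorem aDigEnd_ge (l : List Char) (j : Nat) : j ≤ aDigEnd l j := by
  fun_induction aDigEnd l j <;> omega

theorem aDigEnd_gt (l : List Char) (i : Nat) (h : i < l.length)
    (hd : PySem.Chars.isdigit l[i] = true) : i < aDigEnd l i := by
  rw [aDigEnd, dif_pos h, if_pos hd]
  have := aDigEnd_ge l (i + 1)
  omega

-- the outer 'while i < len(body)' loop, with the running 'out' list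
def aLoop (l : List Char) (i : Nat) (out : List String) : List String :=
  if h : i < l.length then
    let c := l[i]
    if PySem.Chars.isspace c then aLoop l (i + 1) out
    else if c ∈ ['(', ')', '{', '}', '|'] then aLoop l (i + 1) (out ++ [String.ofList [c]])
    else if PySem.Chars.isdigit c then
      -- body[i:j] with j = aDigEnd l i
      aLoop l (aDigEnd l i) (out ++ [String.ofList (PySem.List.slice l (some (i : Int)) (some ((aDigEnd l i : Nat) : Int)))])
    else aLoop l (i + 1) out
  else out
termination_by l.length - i
decreasing_by
  · omega
  · omega
  · rename_i hd
    have := aDigEnd_gt l i h hd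
    omega
  · omega

def score_tokenize_py (body : String) : List String := aLoop body.toList 0 []

-- ===== PORT B =====
-- hand-ported regex engine scan for r'\d+|[(){}|]': at each char, a maximal \d+ run
-- ('0'-'9' only, exact for \d on the ASCII domain), else a single bracket/pipe, else no match
def bScan : List Char → List String
  | [] => []
  | c :: rest =>
    if '0' ≤ c ∧ c ≤ '9' then
      String.ofList (c :: rest.takeWhile (fun d => '0' ≤ d && d ≤ '9')) ::
        bScan (rest.dropWhile (fun d => '0' ≤ d && d ≤ '9'))
    else if c ∈ ['(', ')', '{', '}', '|'] then String.ofList [c] :: bScan rest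
    else bScan rest
termination_by l => l.length
decreasing_by
  · simp only [List.length_cons]
    exact Nat.lt_succ_of_le (List.length_dropWhile_le _ _)
  · simp
  · simp

def score_tokenize_py_alt (body : String) : List String := bScan body.toList

-- ===== PRECONDITION & SPEC =====
def Spec_score_tokenize_py (body : String) (out : List String) : Prop := out = score_tokenize_py_alt body
instance (body : String) (out : List String) : Decidable (Spec_score_tokenize_py body out) := by unfold Spec_score_tokenize_py; infer_instance

-- ===== CLAIM (what is proved, stated in full; the proofs are below) =====
def Claim_equal_score_tokenize_py : Prop := ∀ (body : String), Dom_score_tokenize_py body → Spec_score_tokenize_py body (score_tokenize_py body)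

-- ===== LEMMAS AND PROOFS =====

theorem isdigit_eq (c : Char) : PySem.Chars.isdigit c = ('0' ≤ c && c ≤ '9') := by
  simp [PySem.Chars.isdigit]

theorem char_le_iff_toNat (c d : Char) : c ≤ d ↔ c.toNat ≤ d.toNat := by
  rw [Char.le_def, UInt32.le_iff_toNat_le]; rfl

theorem isspace_not_digit {c : Char} (h : PySem.Chars.isspace c = true) :
    ('0' ≤ c ∧ c ≤ '9') → False := by
  intro hc
  have hv : 48 ≤ c.toNat ∧ c.toNat ≤ 57 := by
    simpa [char_le_iff_toNat] using hc
  simp [PySem.Chars.isspace] at h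
  omega

theorem isspace_not_paren {c : Char} (h : PySem.Chars.isspace c = true) :
    c ∈ ['(', ')', '{', '}', '|'] → False := by
  intro hm
  simp [PySem.Chars.isspace] at h
  fin_cases hm <;> simp_all

theorem drop_len_takeWhile (p : Char → Bool) (l : List Char) :
    l.drop ((l.takeWhile p).length) = l.dropWhile p := by
  induction l with
  | nil => simp
  | cons a t ih =>
    by_cases hp : p a = true <;> simp [hp, ih]

-- aDigEnd walks exactly over the maximal digit run of l.drop j
theorem aDigEnd_spec (l : List Char) (j : Nat) :
    aDigEnd l j = j + ((l.drop j).takeWhile (fun d => '0' ≤ d && d ≤ '9')).length := by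
  fun_induction aDigEnd l j with
  | case1 j h hd ih =>
    have hdrop : l.drop j = l[j] :: l.drop (j + 1) := List.drop_eq_getElem_cons h
    rw [hdrop, List.takeWhile_cons]
    rw [isdigit_eq] at hd
    simp [hd] at ih ⊢
    omega
  | case2 j h hd =>
    have hdrop : l.drop j = l[j] :: l.drop (j + 1) := List.drop_eq_getElem_cons h
    rw [hdrop, List.takeWhile_cons]
    rw [isdigit_eq] at hd
    simp [hd]
  | case3 j h =>
    have : l.drop j = [] := List.drop_eq_nil_of_le (by omega)
    simp [this]

theorem slice_run (l : List Char) (i : Nat) :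
    PySem.List.slice l (some (i : Int)) (some ((aDigEnd l i : Nat) : Int)) =
      (l.drop i).takeWhile (fun d => '0' ≤ d && d ≤ '9') := by
  rw [PySem.List.slice_natCast, aDigEnd_spec]
  simp only [Nat.add_sub_cancel_left]
  have hp := List.takeWhile_prefix (l := l.drop i) (p := fun d => decide ('0' ≤ d) && decide (d ≤ '9'))
  rw [List.prefix_iff_eq_take] at hp
  exact hp.symm

-- main invariant: the A-loop from position i appends exactly bScan of the rest
theorem aLoop_eq (l : List Char) (i : Nat) (out : List String) :
    aLoop l i out = out ++ bScan (l.drop i) := by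
  fun_induction aLoop l i out with
  | case1 i out h c hsp ih =>
    have hdrop : l.drop i = l[i] :: l.drop (i + 1) := List.drop_eq_getElem_cons h
    rw [ih, hdrop, bScan]
    have h1 := fun hc => isspace_not_digit hsp hc
    have h2 := fun hc => isspace_not_paren hsp hc
    simp only [c] at *
    rw [if_neg h1, if_neg h2]
  | case2 i out h c hsp hp ih =>
    have hdrop : l.drop i = l[i] :: l.drop (i + 1) := List.drop_eq_getElem_cons h
    rw [ih, hdrop, bScan]
    have hnd : ¬ ('0' ≤ l[i] ∧ l[i] ≤ '9') := by
      intro hc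
      have hv : 48 ≤ c.toNat ∧ c.toNat ≤ 57 := by simpa [char_le_iff_toNat] using hc
      simp only [List.mem_cons, List.not_mem_nil, or_false] at hp
      rcases hp with hh | hh | hh | hh | hh <;> rw [hh] at hv <;> revert hv <;> decide
    simp only [c] at *
    rw [if_neg hnd, if_pos hp]
    simp
  | case3 i out h c hsp hp hd ih =>
    have hdrop : l.drop i = l[i] :: l.drop (i + 1) := List.drop_eq_getElem_cons h
    rw [ih, hdrop, bScan]
    rw [isdigit_eq] at hd
    have hd' : '0' ≤ l[i] ∧ l[i] ≤ '9' := by simpa using hd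
    simp only [c] at *
    rw [if_pos hd']
    have hkey : ∀ (k : Nat), l.drop (i + k) = (l.drop i).drop k := by
      intro k; rw [List.drop_drop, Nat.add_comm]
    have hrest : l.drop (aDigEnd l i) = (l.drop (i + 1)).dropWhile (fun d => '0' ≤ d && d ≤ '9') := by
      rw [aDigEnd_spec, hdrop, List.takeWhile_cons]
      simp only [hd'.1, hd'.2, decide_true, Bool.and_self, if_true, List.length_cons]
      rw [hkey, hdrop, List.drop_succ_cons, drop_len_takeWhile]
    have hslice : PySem.List.slice l (some (i : Int)) (some ((aDigEnd l i : Nat) : Int)) =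
        l[i] :: (l.drop (i + 1)).takeWhile (fun d => '0' ≤ d && d ≤ '9') := by
      rw [slice_run, hdrop, List.takeWhile_cons]
      simp [hd'.1, hd'.2]
    rw [hslice, hrest]
    simp
  | case4 i out h c hsp hp hd ih =>
    have hdrop : l.drop i = l[i] :: l.drop (i + 1) := List.drop_eq_getElem_cons h
    rw [ih, hdrop, bScan]
    rw [isdigit_eq] at hd
    have hnd : ¬ ('0' ≤ l[i] ∧ l[i] ≤ '9') := by simpa using hd
    simp only [c] at *
    rw [if_neg hnd, if_neg hp]
  | case5 i out h =>
    have : l.drop i = [] := List.drop_eq_nil_of_le (by omega)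
    simp [this, bScan]

-- ===== VERDICT (by name: the statement is the Claim_ definition above) =====
theorem score_tokenize_py_spec : Claim_equal_score_tokenize_py := by
  intro body _
  unfold Spec_score_tokenize_py score_tokenize_py score_tokenize_py_alt
  simpa using aLoop_eq body.toList 0 []
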